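-- pv_equiv track=rewrite | github.com/zhihanxu/DSA_training | company/meta/oa/n4p1.py | end_time_after_processing
-- ===== SOURCE A (Python) =====
-- def end_time_after_processing(arrivals, service_time=300, capacity=10):
--     """
--     arrivals:  可迭代/列表，元素是到达时刻（秒）。可无序；函数内会排序。
--     service_time: 单个item处理时长（秒），题目为 300。
--     capacity:   等待容器容量，题目为 10。
--     返回：当处理/丢掉完所有item后，时间的秒数（int）。
--     """
--     if not arrivals:
--         return 0
--
--     arrivals = sorted(arrivals)
--     next_free = 0
--     containter = []
--
--     for t in arrivals:
--          # Process queued items if processor was idle before this arrival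
--         while containter and t >= next_free:
--             next_free += service_time
--             containter.pop(0)
--
--         if t >= next_free:
--              # processor idle at arrival
--             next_free = t + service_time
--         else:
--             # processor busy
--             if len(containter) < capacity:
--                 containter.append(t)
--             else:
--                 pass  # discard
--     return next_free + len(containter) * service_time
-- ===== SOURCE B (Python) =====
-- def end_time_after_processing(arrivals, service_time=300, capacity=10):
--     if not arrivals:
--         return 0
--     next_free = 0
--     queue_size = 0
--     for t in sorted(arrivals):
--         if queue_size > 0 and t >= next_free:
--             # closed-form drain of the waiting queue (nonpositive service_time drains it all)
--             if service_time > 0: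
--                 drained = min(queue_size, (t - next_free) // service_time + 1)
--             else:
--                 drained = queue_size
--             next_free += drained * service_time
--             queue_size -= drained
--         if t >= next_free:
--             next_free = t + service_time
--         elif queue_size < capacity:
--             queue_size += 1
--     return next_free + queue_size * service_time
-- ===== Notes on version B (the rewrite author's own statement) =====
-- stated objective: alternative
-- what changed: The waiting container list and A's one-pop-at-a-time while loop are replaced by an integer queue count with a closed-form drain (min(queue, (t-next_free)//service_time + 1) for positive service_time, the whole queue otherwise), so no list is ever built or popped; the sort dominates, so the measured cost is similar.
import Mathlib
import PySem

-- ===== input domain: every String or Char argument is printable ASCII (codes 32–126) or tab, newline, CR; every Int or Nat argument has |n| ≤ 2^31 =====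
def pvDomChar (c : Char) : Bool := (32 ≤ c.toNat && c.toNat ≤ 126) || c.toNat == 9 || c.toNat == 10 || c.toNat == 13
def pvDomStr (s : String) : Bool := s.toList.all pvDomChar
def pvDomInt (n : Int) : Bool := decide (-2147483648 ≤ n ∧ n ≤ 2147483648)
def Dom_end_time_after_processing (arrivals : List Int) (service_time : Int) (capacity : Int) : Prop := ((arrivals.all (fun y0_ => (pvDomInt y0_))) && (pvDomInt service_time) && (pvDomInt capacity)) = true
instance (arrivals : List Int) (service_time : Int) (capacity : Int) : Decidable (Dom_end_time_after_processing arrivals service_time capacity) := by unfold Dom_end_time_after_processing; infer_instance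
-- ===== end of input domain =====

-- B replaces A's waiting-container list and its one-pop-at-a-time while loop by an integer
-- queue count with a closed-form drain; same return value, proved equal on the whole domain.
-- (No speed claim: the sort dominates and the measured cost is similar.)

-- ===== PORT A =====
-- `while containter and t >= next_free: next_free += service_time; containter.pop(0)`
def pvDrainA (t st : Int) : Int → List Int → Int × List Int
  | nf, [] => (nf, [])
  | nf, c :: cs => if t ≥ nf then pvDrainA t st (nf + st) cs else (nf, c :: cs)

-- one iteration of A's `for t in arrivals` loop, state = (next_free, containter)
def pvStepA (st cap : Int) (s : Int × List Int) (t : Int) : Int × List Int :=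
  let s1 := pvDrainA t st s.1 s.2
  if t ≥ s1.1 then (t + st, s1.2)
  else if (s1.2.length : Int) < cap then (s1.1, s1.2 ++ [t]) else s1

def end_time_after_processing (arrivals : List Int) (service_time : Int) (capacity : Int) : Int :=
  if arrivals = [] then 0
  else
    let s := (PySem.List.sorted arrivals (fun x => x) false).foldl (pvStepA service_time capacity) (0, [])
    s.1 + (s.2.length : Int) * service_time

-- ===== PORT B =====
-- one iteration of B's loop, state = (next_free, queue_size)
def pvStepB (st cap : Int) (s : Int × Int) (t : Int) : Int × Int :=
  let s1 :=
    if s.2 > 0 ∧ t ≥ s.1 then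
      let d := if st > 0 then min s.2 (PySem.Int.floordiv (t - s.1) st + 1) else s.2
      (s.1 + d * st, s.2 - d)
    else s
  if t ≥ s1.1 then (t + st, s1.2)
  else if s1.2 < cap then (s1.1, s1.2 + 1) else s1

def end_time_after_processing_alt (arrivals : List Int) (service_time : Int) (capacity : Int) : Int :=
  if arrivals = [] then 0
  else
    let s := (PySem.List.sorted arrivals (fun x => x) false).foldl (pvStepB service_time capacity) (0, 0)
    s.1 + s.2 * service_time

-- ===== PRECONDITION & SPEC =====
def Spec_end_time_after_processing (arrivals : List Int) (service_time : Int) (capacity : Int) (out : Int) : Prop := out = end_time_after_processing_alt arrivals service_time capacity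
instance (arrivals : List Int) (service_time : Int) (capacity : Int) (out : Int) : Decidable (Spec_end_time_after_processing arrivals service_time capacity out) := by unfold Spec_end_time_after_processing; infer_instance

-- ===== CLAIM (what is proved, stated in full; the proofs are below) =====
def Claim_equal_end_time_after_processing : Prop := ∀ (arrivals : List Int) (service_time : Int) (capacity : Int), Dom_end_time_after_processing arrivals service_time capacity → Spec_end_time_after_processing arrivals service_time capacity (end_time_after_processing arrivals service_time capacity)

-- ===== LEMMAS AND PROOFS =====

-- the number of items A's while loop pops for arrival t from container `cont` at time nf
def pvD (t st nf : Int) : List Int → Int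
  | [] => 0
  | _ :: cs =>
    if t ≥ nf then
      (if st > 0 then min ((cs.length : Int) + 1) (PySem.Int.floordiv (t - nf) st + 1)
       else (cs.length : Int) + 1)
    else 0

-- one unrolling of the pop count when the while guard holds
lemma pvD_cons (t st nf c : Int) (cs : List Int) (h : t ≥ nf) :
    pvD t st nf (c :: cs) = pvD t st (nf + st) cs + 1 := by
  by_cases hst : st > 0
  · have hf : PySem.Int.floordiv (t - nf) st * st ≤ t - nf ∧
        t - nf < (PySem.Int.floordiv (t - nf) st + 1) * st :=
      (PySem.Int.floordiv_eq_iff_of_pos hst).mp rfl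
    by_cases h2 : t ≥ nf + st
    · have hf' : PySem.Int.floordiv (t - (nf + st)) st = PySem.Int.floordiv (t - nf) st - 1 := by
        rw [PySem.Int.floordiv_eq_iff_of_pos hst]
        constructor <;> nlinarith [hf.1, hf.2]
      cases cs with
      | nil =>
        have h1 : (1:Int) ≤ PySem.Int.floordiv (t - nf) st := by
          rw [PySem.Int.le_floordiv_iff_mul_le hst]; omega
        simp only [pvD, if_pos h, if_pos hst, List.length_nil]
        omega
      | cons c' cs' =>
        simp only [pvD, if_pos h, if_pos h2, if_pos hst, hf', List.length_cons]
        push_cast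
        omega
    · have hf0 : PySem.Int.floordiv (t - nf) st = 0 := by
        rw [PySem.Int.floordiv_eq_iff_of_pos hst]; omega
      cases cs with
      | nil =>
        simp only [pvD, if_pos h, if_pos hst, hf0, List.length_nil]
        norm_num
      | cons c' cs' =>
        simp only [pvD, if_pos h, if_neg h2, if_pos hst, hf0, List.length_cons]
        push_cast
        omega
  · cases cs with
    | nil => simp [pvD, h, hst]
    | cons c' cs' =>
      have h2 : t ≥ nf + st := by omega
      simp only [pvD, if_pos h, if_pos h2, if_neg hst, List.length_cons]
      push_cast
      omega

-- A's while loop advances next_free by pvD steps and drops pvD items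
lemma drain_couple (t st : Int) : ∀ (cont : List Int) (nf : Int),
    (pvDrainA t st nf cont).1 = nf + pvD t st nf cont * st ∧
    ((pvDrainA t st nf cont).2.length : Int) = (cont.length : Int) - pvD t st nf cont := by
  intro cont
  induction cont with
  | nil => intro nf; simp [pvDrainA, pvD]
  | cons c cs ih =>
    intro nf
    by_cases h : t ≥ nf
    · have hd := pvD_cons t st nf c cs h
      obtain ⟨ih1, ih2⟩ := ih (nf + st)
      simp only [pvDrainA, if_pos h, hd, List.length_cons]
      constructor
      · rw [ih1]; ring
      · push_cast; omega
    · simp [pvDrainA, pvD, h]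

-- B's closed-form drain computes exactly (nf + pvD·st, len − pvD)
lemma stepB_drain (st t nf : Int) (cont : List Int) :
    (if (cont.length : Int) > 0 ∧ t ≥ nf then
       ((nf + (if st > 0 then min (cont.length : Int) (PySem.Int.floordiv (t - nf) st + 1)
               else (cont.length : Int)) * st),
        ((cont.length : Int) - (if st > 0 then min (cont.length : Int) (PySem.Int.floordiv (t - nf) st + 1)
               else (cont.length : Int))))
     else (nf, (cont.length : Int))) =
    (nf + pvD t st nf cont * st, (cont.length : Int) - pvD t st nf cont) := by
  cases cont with
  | nil => simp [pvD]
  | cons c cs =>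
    by_cases h : t ≥ nf
    · simp only [pvD, List.length_cons, if_pos h]
      have : ((cs.length + 1 : Nat) : Int) = (cs.length : Int) + 1 := by push_cast; omega
      rw [this]
      have hpos : ((cs.length : Int) + 1) > 0 := by omega
      rw [if_pos ⟨hpos, h⟩]
    · simp [pvD, h]

-- one loop iteration preserves the coupling (queue count = container length)
lemma step_couple (st cap t nf : Int) (cont : List Int) :
    pvStepB st cap (nf, (cont.length : Int)) t =
      ((pvStepA st cap (nf, cont) t).1, ((pvStepA st cap (nf, cont) t).2.length : Int)) := by
  obtain ⟨h1, h2⟩ := drain_couple t st cont nf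
  have hB := stepB_drain st t nf cont
  simp only [pvStepB, pvStepA]
  rw [hB, ← h1, ← h2]
  by_cases hidle : t ≥ (pvDrainA t st nf cont).1
  · simp [hidle]
  · simp only [if_neg hidle]
    by_cases hcap : ((pvDrainA t st nf cont).2.length : Int) < cap
    · simp [hcap]
    · simp [hcap]

-- the whole loops stay coupled
lemma fold_couple (st cap : Int) : ∀ (ts : List Int) (nf : Int) (cont : List Int),
    ts.foldl (pvStepB st cap) (nf, (cont.length : Int)) =
      ((ts.foldl (pvStepA st cap) (nf, cont)).1,
       ((ts.foldl (pvStepA st cap) (nf, cont)).2.length : Int)) := by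
  intro ts
  induction ts with
  | nil => intro nf cont; rfl
  | cons t ts ih =>
    intro nf cont
    simp only [List.foldl_cons]
    rw [step_couple st cap t nf cont]
    exact ih (pvStepA st cap (nf, cont) t).1 (pvStepA st cap (nf, cont) t).2

-- ===== VERDICT (by name: the statement is the Claim_ definition above) =====
theorem end_time_after_processing_spec : Claim_equal_end_time_after_processing := by
  intro arrivals st cap _
  unfold Spec_end_time_after_processing end_time_after_processing end_time_after_processing_alt
  by_cases h : arrivals = []
  · simp [h]
  · simp only [if_neg h]
    have h0 : ((0 : Int), (0 : Int)) = ((0 : Int), ((([] : List Int)).length : Int)) := by simp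
    rw [h0, fold_couple st cap (PySem.List.sorted arrivals (fun x => x) false) 0 []]
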